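-- pv_equiv track=rewrite | github.com/Skamlo/buildings-instance-segmentation | modules/dataset/instance_seg_dataset.py | _rotate_boxes_90k
-- ===== SOURCE A (Python) =====
-- def _rotate_boxes_90k(boxes, W, H, k):
--     if k % 4 == 0:
--         return boxes, W, H
--
--     rotated_boxes = []
--     for (xmin, ymin, xmax, ymax) in boxes:
--         # four corners
--         corners = [
--             (xmin, ymin),
--             (xmax, ymin),
--             (xmax, ymax),
--             (xmin, ymax)
--         ]
--         new_corners = []
--         for (x, y) in corners:
--             if k % 4 == 1:   # 90 CW
--                 x_new = H - 1 - y
--                 y_new = x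
--             elif k % 4 == 2: # 180
--                 x_new = W - 1 - x
--                 y_new = H - 1 - y
--             elif k % 4 == 3: # 270 CW (or 90 CCW)
--                 x_new = y
--                 y_new = W - 1 - x
--             new_corners.append((x_new, y_new))
--         xs = [c[0] for c in new_corners]
--         ys = [c[1] for c in new_corners]
--         rotated_boxes.append([min(xs), min(ys), max(xs), max(ys)])
--
--     # rotated image size swaps when k is odd
--     if k % 2 == 1:
--         return rotated_boxes, H, W
--     else:
--         return rotated_boxes, W, H
-- ===== SOURCE B (Python) =====
-- def _rotate_boxes_90k(boxes, W, H, k):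
--     m = k % 4
--     if m == 0:
--         return boxes, W, H
--
--     def rot(box):
--         x0, y0, x1, y1 = box
--         xlo, xhi = min(x0, x1), max(x0, x1)
--         ylo, yhi = min(y0, y1), max(y0, y1)
--         if m == 1:   # 90 CW
--             return [H - 1 - yhi, xlo, H - 1 - ylo, xhi]
--         if m == 2:   # 180
--             return [W - 1 - xhi, H - 1 - yhi, W - 1 - xlo, H - 1 - ylo]
--         # m == 3: 270 CW
--         return [ylo, W - 1 - xhi, yhi, W - 1 - xlo]
--
--     rotated = [rot(b) for b in boxes]
--     return (rotated, H, W) if m % 2 == 1 else (rotated, W, H)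
-- ===== Notes on version B (the rewrite author's own statement) =====
-- stated objective: simpler
-- what changed: Each rotated box is computed by a per-rotation closed-form formula (min/max of the two original coordinates), replacing A's enumeration of four corners and min/max scans over the corner lists.
import Mathlib
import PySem

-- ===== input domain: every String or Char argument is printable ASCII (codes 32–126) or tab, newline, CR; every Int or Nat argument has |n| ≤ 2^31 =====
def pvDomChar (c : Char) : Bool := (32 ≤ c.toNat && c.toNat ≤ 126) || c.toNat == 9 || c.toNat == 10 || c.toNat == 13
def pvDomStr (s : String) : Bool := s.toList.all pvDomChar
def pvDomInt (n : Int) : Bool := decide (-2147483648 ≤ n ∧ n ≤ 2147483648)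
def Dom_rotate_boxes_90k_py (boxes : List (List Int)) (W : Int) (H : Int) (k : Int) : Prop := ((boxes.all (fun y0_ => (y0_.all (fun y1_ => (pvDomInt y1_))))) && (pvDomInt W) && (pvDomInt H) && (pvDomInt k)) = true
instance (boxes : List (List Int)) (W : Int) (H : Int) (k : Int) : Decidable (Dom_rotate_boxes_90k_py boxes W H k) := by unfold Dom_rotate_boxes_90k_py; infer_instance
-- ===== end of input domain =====

-- B computes each rotated box by a per-rotation closed-form min/max formula instead of
-- enumerating four corners and scanning them for min/max (objective: simpler).


-- ===== PORT A =====
-- per-box body of A's loop: the four corners, the corner rotation, then min/max scans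
def pvRotBoxA (W H k : Int) (box : List Int) : List Int :=
  match box with
  | [xmin, ymin, xmax, ymax] =>
    let corners : List (Int × Int) := [(xmin, ymin), (xmax, ymin), (xmax, ymax), (xmin, ymax)]
    let new_corners := corners.map (fun p =>
      if PySem.Int.mod k 4 == 1 then (H - 1 - p.2, p.1)
      else if PySem.Int.mod k 4 == 2 then (W - 1 - p.1, H - 1 - p.2)
      else (p.2, W - 1 - p.1))
    let xs := new_corners.map (fun c => c.1)
    let ys := new_corners.map (fun c => c.2)
    [(PySem.List.min? xs (fun v => v)).getD 0, (PySem.List.min? ys (fun v => v)).getD 0,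
     (PySem.List.max? xs (fun v => v)).getD 0, (PySem.List.max? ys (fun v => v)).getD 0]
  | _ => []  -- Python raises ValueError on unpacking here; excluded by Pre_

def rotate_boxes_90k_py (boxes : List (List Int)) (W : Int) (H : Int) (k : Int) : List (List Int) × Int × Int :=
  if PySem.Int.mod k 4 == 0 then (boxes, W, H)
  else
    let rotated_boxes := boxes.foldl (fun acc box => acc ++ [pvRotBoxA W H k box]) []
    if PySem.Int.mod k 2 == 1 then (rotated_boxes, H, W) else (rotated_boxes, W, H)

-- ===== PORT B =====
def pvRotBoxB (W H k : Int) (box : List Int) : List Int :=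
  match box with
  | [x0, y0, x1, y1] =>
    let xlo := min x0 x1
    let xhi := max x0 x1
    let ylo := min y0 y1
    let yhi := max y0 y1
    let m := PySem.Int.mod k 4
    if m == 1 then [H - 1 - yhi, xlo, H - 1 - ylo, xhi]
    else if m == 2 then [W - 1 - xhi, H - 1 - yhi, W - 1 - xlo, H - 1 - ylo]
    else [ylo, W - 1 - xhi, yhi, W - 1 - xlo]
  | _ => []  -- Python raises ValueError on unpacking here; excluded by Pre_

def rotate_boxes_90k_py_alt (boxes : List (List Int)) (W : Int) (H : Int) (k : Int) : List (List Int) × Int × Int :=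
  let m := PySem.Int.mod k 4
  if m == 0 then (boxes, W, H)
  else
    let rotated := boxes.map (pvRotBoxB W H k)
    if PySem.Int.mod m 2 == 1 then (rotated, H, W) else (rotated, W, H)

-- ===== PRECONDITION & SPEC =====
-- Pre_ excludes only inputs where both Pythons raise ValueError: k % 4 ≠ 0 together with a
-- box that does not unpack into exactly four coordinates.
def Pre_rotate_boxes_90k_py (boxes : List (List Int)) (W : Int) (H : Int) (k : Int) : Prop :=
  PySem.Int.mod k 4 = 0 ∨ ∀ b ∈ boxes, b.length = 4
instance (boxes : List (List Int)) (W : Int) (H : Int) (k : Int) : Decidable (Pre_rotate_boxes_90k_py boxes W H k) := by unfold Pre_rotate_boxes_90k_py; infer_instance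

def pvWitness_rotate_boxes_90k_py : List (List Int) × Int × Int × Int := ([[1, 2, 3, 4], [0, 0, 2, 2]], 5, 6, 1)

def Spec_rotate_boxes_90k_py (boxes : List (List Int)) (W : Int) (H : Int) (k : Int) (out : List (List Int) × Int × Int) : Prop := out = rotate_boxes_90k_py_alt boxes W H k
instance (boxes : List (List Int)) (W : Int) (H : Int) (k : Int) (out : List (List Int) × Int × Int) : Decidable (Spec_rotate_boxes_90k_py boxes W H k out) := by unfold Spec_rotate_boxes_90k_py; infer_instance

-- ===== CLAIM (what is proved, stated in full; the proofs are below) =====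
def Claim_equal_rotate_boxes_90k_py : Prop := ∀ (boxes : List (List Int)) (W : Int) (H : Int) (k : Int), Dom_rotate_boxes_90k_py boxes W H k → Pre_rotate_boxes_90k_py boxes W H k → Spec_rotate_boxes_90k_py boxes W H k (rotate_boxes_90k_py boxes W H k)

-- ===== LEMMAS AND PROOFS =====

lemma pvModEmod4 (k : Int) : PySem.Int.mod k 4 = k % 4 :=
  PySem.Int.mod_eq_emod_of_pos (by norm_num)

lemma pvRotBox_eq (W H k : Int) (box : List Int) (hlen : box.length = 4)
    (hm : PySem.Int.mod k 4 ≠ 0) : pvRotBoxA W H k box = pvRotBoxB W H k box := by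
  match box, hlen with
  | [a, b, c, d], _ =>
    rw [pvModEmod4] at hm
    have h4 : k % 4 = 1 ∨ k % 4 = 2 ∨ k % 4 = 3 := by omega
    rcases h4 with h | h | h
    all_goals
      simp [pvRotBoxA, pvRotBoxB, h,
        PySem.List.min?_id_cons, PySem.List.max?_id_cons]
      omega

-- ===== VERDICT (by name: the statement is the Claim_ definition above) =====
theorem rotate_boxes_90k_py_spec : Claim_equal_rotate_boxes_90k_py := by
  intro boxes W H k _hdom hpre
  unfold Spec_rotate_boxes_90k_py rotate_boxes_90k_py rotate_boxes_90k_py_alt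
  by_cases h0 : PySem.Int.mod k 4 = 0
  · simp only [h0, beq_self_eq_true, if_pos]
  · rcases hpre with h | hlen
    · exact absurd h h0
    have hmap : boxes.foldl (fun acc box => acc ++ [pvRotBoxA W H k box]) []
        = boxes.map (pvRotBoxB W H k) := by
      have : ∀ (l : List (List Int)) (acc : List (List Int)), (∀ b ∈ l, b.length = 4) →
          l.foldl (fun acc box => acc ++ [pvRotBoxA W H k box]) acc
            = acc ++ l.map (pvRotBoxB W H k) := by
        intro l
        induction l with
        | nil => intro acc _; simp
        | cons x t ih =>
          intro acc hl
          simp only [List.foldl_cons, List.map_cons]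
          rw [pvRotBox_eq W H k x (hl x (List.mem_cons_self)) h0,
              ih _ (fun b hb => hl b (List.mem_cons_of_mem _ hb))]
          simp
      simpa using this boxes [] hlen
    have h24 : PySem.Int.mod k 2 = PySem.Int.mod (PySem.Int.mod k 4) 2 := by
      simp [PySem.Int.mod]
    simp only [h0, beq_iff_eq, if_false, hmap, h24]
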